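-- pv_equiv track=rewrite | github.com/dikshap07/Algorithms-and-Data-Structures | src/Recursion/subsetQues.py | subset_array_ASCII
-- ===== SOURCE A (Python) =====
-- def subset_array_ASCII(processed,unprocessed):
--
--     #base case
--     if unprocessed== "":
--         ascii = [ord(char) for char in processed]
--         return [{processed: ascii}]
--
--     char = unprocessed[0]
--     included_char = subset_array_ASCII(processed + char,unprocessed[1:])
--     excluded_char = subset_array_ASCII(processed,unprocessed[1:])
--
--     return included_char + excluded_char
-- ===== SOURCE B (Python) =====
-- def subset_array_ASCII(processed, unprocessed):
--     n = len(unprocessed)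
--     res = []
--     for mask in range(2 ** n - 1, -1, -1):
--         s = processed
--         for i, ch in enumerate(unprocessed):
--             if (mask >> (n - 1 - i)) & 1:
--                 s += ch
--         res.append({s: [ord(c) for c in s]})
--     return res
-- ===== Notes on version B (the rewrite author's own statement) =====
-- stated objective: alternative
-- what changed: Replaces A's include/exclude tree recursion with a single flat loop over bitmasks counting down from 2**n-1, decoding each mask (first char = MSB) to build the subset string directly.
import Mathlib
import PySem

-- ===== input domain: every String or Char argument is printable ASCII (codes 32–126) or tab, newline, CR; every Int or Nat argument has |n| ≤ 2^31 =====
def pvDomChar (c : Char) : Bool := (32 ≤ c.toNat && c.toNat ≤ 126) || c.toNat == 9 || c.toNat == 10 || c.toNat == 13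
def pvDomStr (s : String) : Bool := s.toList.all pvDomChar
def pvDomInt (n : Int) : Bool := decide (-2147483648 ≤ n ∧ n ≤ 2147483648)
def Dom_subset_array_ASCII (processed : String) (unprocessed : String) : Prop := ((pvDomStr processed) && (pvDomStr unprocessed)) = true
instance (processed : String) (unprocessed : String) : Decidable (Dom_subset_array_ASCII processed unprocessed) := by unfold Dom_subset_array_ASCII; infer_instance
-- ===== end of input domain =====

-- B replaces A's include/exclude tree recursion by a single descending-bitmask loop (objective: alternative).

-- ===== PORT A =====
-- A's recursion, on List Char (strings bridged via toList/String.ofList); base case returns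
-- the singleton dict {processed: [ord c for c in processed]}.
def subsetA (processed : List Char) : List Char → List (List (String × List Int))
  | [] => [[(String.ofList processed, processed.map (fun c => (c.toNat : Int)))]]
  | c :: rest => subsetA (processed ++ [c]) rest ++ subsetA processed rest

def subset_array_ASCII (processed : String) (unprocessed : String) : List (List (String × List Int)) :=
  subsetA processed.toList unprocessed.toList

-- ===== PORT B =====
-- the inner 'for i, ch in enumerate(unprocessed): if (mask >> (n-1-i)) & 1: s += ch' loop
def pickRow (n mask : Nat) : List Char → Nat → List Char → List Char
  | [], _, s => s
  | c :: rest, i, s => pickRow n mask rest (i + 1) (if (mask >>> (n - 1 - i)) &&& 1 = 1 then s ++ [c] else s)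

-- range(2**n - 1, -1, -1) is exactly the reverse of range(2**n)
def subset_array_ASCII_alt (processed : String) (unprocessed : String) : List (List (String × List Int)) :=
  let n := unprocessed.toList.length
  ((List.range (2 ^ n)).reverse).map (fun mask =>
    let s := pickRow n mask unprocessed.toList 0 processed.toList
    [(String.ofList s, s.map (fun c => (c.toNat : Int)))])

-- ===== PRECONDITION & SPEC =====
def Spec_subset_array_ASCII (processed : String) (unprocessed : String) (out : List (List (String × List Int))) : Prop := out = subset_array_ASCII_alt processed unprocessed
instance (processed : String) (unprocessed : String) (out : List (List (String × List Int))) : Decidable (Spec_subset_array_ASCII processed unprocessed out) := by unfold Spec_subset_array_ASCII; infer_instance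

-- ===== CLAIM (what is proved, stated in full; the proofs are below) =====
def Claim_equal_subset_array_ASCII : Prop := ∀ (processed : String) (unprocessed : String), Dom_subset_array_ASCII processed unprocessed → Spec_subset_array_ASCII processed unprocessed (subset_array_ASCII processed unprocessed)

-- ===== LEMMAS AND PROOFS =====

-- a bit strictly below the 2^m block is unaffected by adding 2^m
lemma bit_low (k m j : Nat) (hk : k < m) :
    ((2 ^ m + j) >>> k) &&& 1 = (j >>> k) &&& 1 := by
  have h : 2 ^ m = 2 ^ (m - k) * 2 ^ k := by
    rw [← pow_add]; congr 1; omega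
  rw [Nat.shiftRight_eq_div_pow, Nat.shiftRight_eq_div_pow, Nat.and_one_is_mod, Nat.and_one_is_mod]
  have hpos : 0 < 2 ^ k := Nat.two_pow_pos k
  rw [h, Nat.add_comm, Nat.add_mul_div_right _ _ hpos]
  have heven : 2 ^ (m - k) % 2 = 0 := by
    have : m - k ≠ 0 := by omega
    obtain ⟨t, ht⟩ := Nat.exists_eq_succ_of_ne_zero this
    simp [ht, Nat.pow_succ, Nat.mul_comm]
  omega

lemma bit_top_one (m j : Nat) (hj : j < 2 ^ m) : ((2 ^ m + j) >>> m) &&& 1 = 1 := by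
  rw [Nat.shiftRight_eq_div_pow, Nat.and_one_is_mod]
  have hpos : 0 < 2 ^ m := Nat.two_pow_pos m
  have : (2 ^ m + j) / 2 ^ m = 1 := by
    rw [Nat.add_comm, Nat.add_div_right _ hpos, Nat.div_eq_of_lt hj]
  rw [this]

lemma bit_top_zero (m j : Nat) (hj : j < 2 ^ m) : (j >>> m) &&& 1 = 0 := by
  rw [Nat.shiftRight_eq_div_pow, Nat.and_one_is_mod, Nat.div_eq_of_lt hj]

-- shifting both n and i down by one leaves every consulted bit unchanged
lemma pickRow_succ (rest : List Char) : ∀ (n mask i : Nat) (s : List Char),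
    pickRow (n + 1) mask rest (i + 1) s = pickRow n mask rest i s := by
  induction rest with
  | nil => intro n mask i s; simp [pickRow]
  | cons c t ih =>
      intro n mask i s
      have h : n + 1 - 1 - (i + 1) = n - 1 - i := by omega
      simp only [pickRow, h, ih]

-- the 2^m block bit is never consulted while i + |rest| ≤ m
lemma pickRow_high (rest : List Char) : ∀ (m j i : Nat) (s : List Char),
    j < 2 ^ m → i + rest.length ≤ m →
    pickRow m (2 ^ m + j) rest i s = pickRow m j rest i s := by
  induction rest with
  | nil => intro m j i s _ _; simp [pickRow]
  | cons c t ih =>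
      intro m j i s hj hlen
      simp only [List.length_cons] at hlen
      have hk : m - 1 - i < m := by omega
      simp only [pickRow, bit_low _ _ _ hk]
      exact ih m j (i + 1) _ hj (by omega)

lemma subsetA_eq_masks (un : List Char) : ∀ (p : List Char),
    subsetA p un = ((List.range (2 ^ un.length)).reverse).map (fun mask =>
      let s := pickRow un.length mask un 0 p
      [(String.ofList s, s.map (fun c => (c.toNat : Int)))]) := by
  induction un with
  | nil => intro p; simp [subsetA, pickRow]
  | cons c rest ih =>
      intro p
      set m := rest.length with hm
      have hsplit : List.range (2 ^ (m + 1)) =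
          List.range (2 ^ m) ++ (List.range (2 ^ m)).map (fun j => 2 ^ m + j) := by
        rw [pow_succ, Nat.mul_two, List.range_add]
      have hlen : (c :: rest).length = m + 1 := by simp [hm]
      rw [show subsetA p (c :: rest) = subsetA (p ++ [c]) rest ++ subsetA p rest from rfl,
          ih (p ++ [c]), ih p, hlen, hsplit]
      rw [List.reverse_append, List.map_append]
      congr 1
      · rw [show (List.map (fun j => 2 ^ m + j) (List.range (2 ^ m))).reverse
              = List.map (fun j => 2 ^ m + j) (List.range (2 ^ m)).reverse by
            simp [List.map_reverse]]
        rw [List.map_map]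
        apply List.map_congr_left
        intro j hjmem
        have hj : j < 2 ^ m := by
          rw [List.mem_reverse, List.mem_range] at hjmem; exact hjmem
        simp only [Function.comp]
        have hstep : pickRow (m + 1) (2 ^ m + j) (c :: rest) 0 p = pickRow m j rest 0 (p ++ [c]) := by
          have hbit : ((2 ^ m + j) >>> (m + 1 - 1 - 0)) &&& 1 = 1 := by
            simpa using bit_top_one m j hj
          simp only [pickRow, hbit, ite_true]
          rw [pickRow_succ, pickRow_high rest m j 0 _ hj (by omega)]
        rw [hstep]
      · apply List.map_congr_left
        intro j hjmem
        have hj : j < 2 ^ m := by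
          rw [List.mem_reverse, List.mem_range] at hjmem; exact hjmem
        have hstep : pickRow (m + 1) j (c :: rest) 0 p = pickRow m j rest 0 p := by
          have hbit : (j >>> (m + 1 - 1 - 0)) &&& 1 = 0 := by
            simpa using bit_top_zero m j hj
          simp only [pickRow, hbit]
          rw [if_neg (by omega), pickRow_succ]
        rw [hstep]

-- ===== VERDICT (by name: the statement is the Claim_ definition above) =====
theorem subset_array_ASCII_spec : Claim_equal_subset_array_ASCII := by
  intro processed unprocessed _
  show subset_array_ASCII processed unprocessed = subset_array_ASCII_alt processed unprocessed
  unfold subset_array_ASCII subset_array_ASCII_alt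
  exact subsetA_eq_masks unprocessed.toList processed.toList
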